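-- pv_equiv track=rewrite | github.com/liu2g/TutorCal | email_read.py | strip_topic
-- ===== SOURCE A (Python) =====
-- def strip_topic(topic): #The string will apprear in a format of 12XXXX#3456 7890, we need XXXX3456 part
-- 	subjl=[]
-- 	codel=[]
-- 	is_letter_yet=False
-- 	for ch in topic:
-- 		if ch.isalpha():
-- 			is_letter_yet=True
-- 			subjl.append(ch)
-- 		if is_letter_yet and ch.isdigit():
-- 			codel.append(ch)
-- 	return ''.join(subjl)+''.join(codel)
-- ===== SOURCE B (Python) =====
-- def strip_topic(topic):
--     letters = [c for c in topic if c.isalpha()]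
--     i = next((j for j, c in enumerate(topic) if c.isalpha()), len(topic))
--     digits = [c for c in topic[i:] if c.isdigit()]
--     return ''.join(letters + digits)
-- ===== Notes on version B (the rewrite author's own statement) =====
-- stated objective: alternative
-- what changed: Replaces the single stateful pass with an is_letter_yet flag by a boundary-index search (first alphabetic position, defaulting to len) plus two independent scoped filters: letters over the whole string, digits over the suffix after the boundary.
import Mathlib
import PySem

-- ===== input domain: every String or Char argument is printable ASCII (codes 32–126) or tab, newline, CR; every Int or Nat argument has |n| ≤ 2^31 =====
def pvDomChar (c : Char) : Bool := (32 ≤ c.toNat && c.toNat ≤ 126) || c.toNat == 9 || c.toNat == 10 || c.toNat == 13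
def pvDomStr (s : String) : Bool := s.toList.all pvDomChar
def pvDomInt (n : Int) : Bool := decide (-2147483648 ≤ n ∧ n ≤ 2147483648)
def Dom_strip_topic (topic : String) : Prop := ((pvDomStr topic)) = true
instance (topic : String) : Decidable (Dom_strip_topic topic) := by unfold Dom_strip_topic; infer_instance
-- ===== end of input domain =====

-- B replaces A's single stateful pass (is_letter_yet flag) by a first-letter boundary search plus two independent filters (letters over the whole string, digits over the suffix); same cost, different decomposition.


-- ===== PORT A =====
-- one pass over the characters carrying (subjl, codel, is_letter_yet)
def pvStripStep (acc : List Char × List Char × Bool) (ch : Char) : List Char × List Char × Bool :=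
  let subjl := if PySem.Chars.isalpha ch then acc.1 ++ [ch] else acc.1
  let flag := if PySem.Chars.isalpha ch then true else acc.2.2
  let codel := if flag && PySem.Chars.isdigit ch then acc.2.1 ++ [ch] else acc.2.1
  (subjl, codel, flag)

def strip_topic (topic : String) : String :=
  let r := topic.toList.foldl pvStripStep ([], [], false)
  String.mk (r.1 ++ r.2.1)

-- ===== PORT B =====
-- topic[i:] with 0 ≤ i ≤ len(topic) is exactly List.drop i
def strip_topic_alt (topic : String) : String :=
  let cs := topic.toList
  let letters := cs.filter PySem.Chars.isalpha
  let i := cs.findIdx PySem.Chars.isalpha   -- next((j for j,c in enumerate(topic) if c.isalpha()), len(topic))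
  let digits := (cs.drop i).filter PySem.Chars.isdigit
  String.mk (letters ++ digits)

-- ===== PRECONDITION & SPEC =====
def Spec_strip_topic (topic : String) (out : String) : Prop := out = strip_topic_alt topic
instance (topic : String) (out : String) : Decidable (Spec_strip_topic topic out) := by unfold Spec_strip_topic; infer_instance

-- ===== CLAIM (what is proved, stated in full; the proofs are below) =====
def Claim_equal_strip_topic : Prop := ∀ (topic : String), Dom_strip_topic topic → Spec_strip_topic topic (strip_topic topic)

-- ===== LEMMAS AND PROOFS =====
theorem pv_alpha_not_digit (c : Char) (h : PySem.Chars.isalpha c = true) :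
    PySem.Chars.isdigit c = false := by
  simp [PySem.Chars.isalpha, PySem.Chars.isupper, PySem.Chars.islower, PySem.Chars.isdigit,
        Char.le_def, UInt32.le_iff_toNat_le] at *
  omega

theorem pv_foldl_true (l : List Char) (s c : List Char) :
    l.foldl pvStripStep (s, c, true) =
      (s ++ l.filter PySem.Chars.isalpha, c ++ l.filter PySem.Chars.isdigit, true) := by
  induction l generalizing s c with
  | nil => simp
  | cons a t ih =>
      by_cases ha : PySem.Chars.isalpha a = true <;>
        by_cases hd : PySem.Chars.isdigit a = true <;>
          simp [pvStripStep, ha, hd, ih, List.filter_cons]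

theorem pv_foldl_false (l : List Char) (s c : List Char) :
    (l.foldl pvStripStep (s, c, false)).1 = s ++ l.filter PySem.Chars.isalpha ∧
    (l.foldl pvStripStep (s, c, false)).2.1 =
      c ++ (l.dropWhile (fun ch => !PySem.Chars.isalpha ch)).filter PySem.Chars.isdigit := by
  induction l generalizing s c with
  | nil => simp
  | cons a t ih =>
      by_cases ha : PySem.Chars.isalpha a = true
      · have hd := pv_alpha_not_digit a ha
        simp [pvStripStep, ha, hd, pv_foldl_true, List.filter_cons, List.dropWhile_cons]
      · simp [pvStripStep, ha, ih, List.dropWhile_cons]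

theorem pv_drop_findIdx (p : Char → Bool) (l : List Char) :
    l.drop (l.findIdx p) = l.dropWhile (fun ch => !p ch) := by
  induction l with
  | nil => simp
  | cons a t ih =>
      by_cases ha : p a = true
      · simp [List.findIdx_cons, ha, List.dropWhile_cons]
      · simp [List.findIdx_cons, ha, List.dropWhile_cons, ih]

-- ===== VERDICT (by name: the statement is the Claim_ definition above) =====
theorem strip_topic_spec : Claim_equal_strip_topic := by
  intro topic _
  unfold Spec_strip_topic strip_topic strip_topic_alt
  obtain ⟨h1, h2⟩ := pv_foldl_false topic.toList [] []
  simp [h1, h2, pv_drop_findIdx]
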